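-- pv_equiv track=rewrite | github.com/tonande02/gangs_of_new_pork | src/raw_to_harmonized/raw_to_harmonized_bike_trips.py | get_sorted_keys
-- ===== SOURCE A (Python) =====
-- def get_sorted_keys(dictionary):
--     list_of_keys=[]
--     for i in dictionary:
--         for keys in i.keys():
--                 list_of_keys.append(keys)
--     sorted_list_of_keys = sorted(set(list_of_keys))
--
--     sorted_list_of_keys = (sorted_list_of_keys[6], sorted_list_of_keys[7], sorted_list_of_keys[12], sorted_list_of_keys[4], sorted_list_of_keys[5])
--     return sorted_list_of_keys
-- ===== SOURCE B (Python) =====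
-- import heapq
--
-- def get_sorted_keys(dictionary):
--     key_set = set()
--     for d in dictionary:
--         key_set.update(d)
--     smallest = heapq.nsmallest(13, key_set)
--     return (smallest[6], smallest[7], smallest[12], smallest[4], smallest[5])
-- ===== Notes on version B (the rewrite author's own statement) =====
-- stated objective: alternative
-- what changed: Builds the distinct-key set incrementally with set.update and replaces the full sort by heapq.nsmallest(13, ...), a heap-based partial selection of only the 13 smallest keys (13 covers the largest index used, 12).
import Mathlib
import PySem

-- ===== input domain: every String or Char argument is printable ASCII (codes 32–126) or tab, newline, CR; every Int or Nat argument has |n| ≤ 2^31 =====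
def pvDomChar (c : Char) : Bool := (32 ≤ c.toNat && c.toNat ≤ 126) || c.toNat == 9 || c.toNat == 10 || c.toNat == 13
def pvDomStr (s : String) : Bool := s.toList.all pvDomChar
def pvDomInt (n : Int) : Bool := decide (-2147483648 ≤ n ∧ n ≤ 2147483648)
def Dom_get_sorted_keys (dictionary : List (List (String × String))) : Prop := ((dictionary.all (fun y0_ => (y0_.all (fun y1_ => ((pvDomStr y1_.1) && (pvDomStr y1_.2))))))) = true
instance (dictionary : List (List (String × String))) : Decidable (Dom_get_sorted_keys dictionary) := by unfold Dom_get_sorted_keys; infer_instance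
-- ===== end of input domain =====

-- B builds the distinct-key set incrementally and selects only the 13 smallest keys (heapq.nsmallest) instead of fully sorting; alternative decomposition, same results.


-- ===== PORT A =====
def get_sorted_keys (dictionary : List (List (String × String))) : String × String × String × String × String :=
  let list_of_keys : List String :=
    dictionary.foldl (fun acc i => i.foldl (fun acc2 kv => acc2 ++ [kv.1]) acc) []
  let sorted_list_of_keys := PySem.List.sorted (PySem.Set.ofList list_of_keys) (fun x => x) false
  -- indexing raises IndexError when fewer than 13 distinct keys; Pre_ excludes that, pyGetD is the total form
  (PySem.List.pyGetD sorted_list_of_keys 6 "", PySem.List.pyGetD sorted_list_of_keys 7 "",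
   PySem.List.pyGetD sorted_list_of_keys 12 "", PySem.List.pyGetD sorted_list_of_keys 4 "",
   PySem.List.pyGetD sorted_list_of_keys 5 "")

-- ===== PORT B =====
-- heapq.nsmallest(n, xs): the n smallest elements in ascending order (stdlib call, ported by its contract)
def pvNsmallest (n : Nat) (xs : List String) : List String :=
  (PySem.List.sorted xs (fun x => x) false).take n

def get_sorted_keys_alt (dictionary : List (List (String × String))) : String × String × String × String × String :=
  let key_set : PySem.Set String :=
    dictionary.foldl (fun s i => PySem.Set.update s (i.map Prod.fst)) PySem.Set.empty
  let smallest := pvNsmallest 13 key_set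
  (PySem.List.pyGetD smallest 6 "", PySem.List.pyGetD smallest 7 "",
   PySem.List.pyGetD smallest 12 "", PySem.List.pyGetD smallest 4 "",
   PySem.List.pyGetD smallest 5 "")

-- ===== PRECONDITION & SPEC =====
-- Pre_ excludes inputs with fewer than 13 distinct keys, on which A raises IndexError (B too).
def Pre_get_sorted_keys (dictionary : List (List (String × String))) : Prop :=
  13 ≤ (PySem.Set.ofList (dictionary.flatMap (fun i => i.map Prod.fst))).length
instance (dictionary : List (List (String × String))) : Decidable (Pre_get_sorted_keys dictionary) := by unfold Pre_get_sorted_keys; infer_instance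

def pvWitness_get_sorted_keys : (List (List (String × String))) :=
  [[("a",""),("b",""),("c",""),("d",""),("e",""),("f",""),("g",""),("h",""),("i",""),("j",""),("k",""),("l",""),("m","")]]

def Spec_get_sorted_keys (dictionary : List (List (String × String))) (out : String × String × String × String × String) : Prop := out = get_sorted_keys_alt dictionary
instance (dictionary : List (List (String × String))) (out : String × String × String × String × String) : Decidable (Spec_get_sorted_keys dictionary out) := by unfold Spec_get_sorted_keys; infer_instance

-- ===== CLAIM (what is proved, stated in full; the proofs are below) =====
def Claim_equal_get_sorted_keys : Prop := ∀ (dictionary : List (List (String × String))), Dom_get_sorted_keys dictionary → Pre_get_sorted_keys dictionary → Spec_get_sorted_keys dictionary (get_sorted_keys dictionary)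

-- ===== LEMMAS AND PROOFS =====

-- A's nested append-loop collects exactly the concatenated key lists.
theorem keys_foldl_eq_flatMap (dictionary : List (List (String × String))) (init : List String) :
    dictionary.foldl (fun acc i => i.foldl (fun acc2 kv => acc2 ++ [kv.1]) acc) init
      = init ++ dictionary.flatMap (fun i => i.map Prod.fst) := by
  induction dictionary generalizing init with
  | nil => simp
  | cons d ds ih =>
    simp only [List.foldl_cons, List.flatMap_cons, ih]
    rw [PySem.List.foldl_append_singleton_eq_map]
    simp

-- B's incremental set.update over the dicts builds set(flatMap keys).
theorem set_foldl_update_eq_ofList (dictionary : List (List (String × String))) (s : PySem.Set String) :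
    dictionary.foldl (fun s i => PySem.Set.update s (i.map Prod.fst)) s
      = PySem.Set.update s (dictionary.flatMap (fun i => i.map Prod.fst)) := by
  induction dictionary generalizing s with
  | nil => simp [PySem.Set.update]
  | cons d ds ih =>
    simp only [List.foldl_cons]
    rw [ih]
    simp [PySem.Set.update, List.foldl_append]

-- ===== VERDICT (by name: the statement is the Claim_ definition above) =====
theorem get_sorted_keys_spec : Claim_equal_get_sorted_keys := by
  intro dictionary _ hpre
  unfold Spec_get_sorted_keys get_sorted_keys get_sorted_keys_alt pvNsmallest
  simp only [keys_foldl_eq_flatMap, List.nil_append]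
  have hset : dictionary.foldl (fun s i => PySem.Set.update s (i.map Prod.fst)) PySem.Set.empty
      = PySem.Set.ofList (dictionary.flatMap (fun i => i.map Prod.fst)) := by
    rw [set_foldl_update_eq_ofList]
    rfl
  rw [hset]
  unfold Pre_get_sorted_keys at hpre
  set L := PySem.List.sorted (PySem.Set.ofList (dictionary.flatMap (fun i => i.map Prod.fst))) (fun x => x) false with hL
  have hlen : 13 ≤ L.length := by
    rw [hL, PySem.List.length_sorted]; exact hpre
  have htake : ∀ k : Nat, k < 13 →
      PySem.List.pyGetD (L.take 13) (k : Int) "" = PySem.List.pyGetD L (k : Int) "" := by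
    intro k hk
    rw [PySem.List.pyGetD_natCast, PySem.List.pyGetD_natCast]
    rw [List.getD_eq_getElem?_getD, List.getD_eq_getElem?_getD, List.getElem?_take]
    simp [hk]
  have h6 := htake 6 (by omega)
  have h7 := htake 7 (by omega)
  have h12 := htake 12 (by omega)
  have h4 := htake 4 (by omega)
  have h5 := htake 5 (by omega)
  norm_num at h6 h7 h12 h4 h5 ⊢
  rw [h6, h7, h12, h4, h5]
  exact ⟨rfl, rfl, rfl, rfl, rfl⟩
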